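-- pv_equiv track=rewrite | github.com/castle6116/CodeCrushers | 지은/Lv.2/롤케이크자르기.py | solution
-- ===== SOURCE A (Python) =====
-- def solution(topping):
--     cnt = 0
--     for i in range(len(topping)):
--         chulsoo = set(topping[:i])
--         brother = set(topping[i:])
--         if len(chulsoo) == len(brother):
--             cnt += 1
--     return cnt
-- ===== SOURCE B (Python) =====
-- def solution(topping):
--     suffix = {}
--     for t in topping:
--         suffix[t] = suffix.get(t, 0) + 1
--     seen = set()
--     cnt = 0
--     for t in topping:
--         if len(seen) == len(suffix):
--             cnt += 1
--         seen.add(t)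
--         c = suffix[t] - 1
--         if c == 0:
--             del suffix[t]
--         else:
--             suffix[t] = c
--     return cnt
-- ===== Notes on version B (the rewrite author's own statement) =====
-- stated objective: faster
-- what changed: Replaced the per-index rebuilding of both sets (set(topping[:i]), set(topping[i:]) for every i) by one precomputed suffix counter and a growing prefix set, maintained incrementally in a single pass.
import Mathlib
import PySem

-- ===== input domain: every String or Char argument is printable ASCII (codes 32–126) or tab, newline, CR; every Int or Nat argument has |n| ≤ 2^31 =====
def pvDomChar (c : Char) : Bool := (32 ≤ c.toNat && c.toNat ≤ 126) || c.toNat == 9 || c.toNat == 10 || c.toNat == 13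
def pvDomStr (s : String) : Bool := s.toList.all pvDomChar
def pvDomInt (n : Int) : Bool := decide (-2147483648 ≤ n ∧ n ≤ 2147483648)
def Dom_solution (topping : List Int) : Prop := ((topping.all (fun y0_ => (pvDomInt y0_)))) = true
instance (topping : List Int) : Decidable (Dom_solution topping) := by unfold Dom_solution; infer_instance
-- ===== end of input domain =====

-- B replaces A's per-index set rebuilding by one precomputed suffix counter plus a growing
-- prefix set, maintained incrementally in a single pass (asymptotically faster).

-- ===== PORT A =====
def solution (topping : List Int) : Int :=
  (PySem.List.pyRange 0 (topping.length : Int) 1).foldl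
    (fun cnt i =>
      let chulsoo : PySem.Set Int := PySem.Set.ofList (PySem.List.slice topping none (some i))
      let brother : PySem.Set Int := PySem.Set.ofList (PySem.List.slice topping (some i) none)
      if chulsoo.length = brother.length then cnt + 1 else cnt)
    0

-- ===== PORT B =====
def solutionAltGo (rest : List Int) (seen : PySem.Set Int) (suffix : PySem.Dict Int Int)
    (cnt : Int) : Int :=
  match rest with
  | [] => cnt
  | t :: rest' =>
    let cnt' := if seen.length = suffix.size then cnt + 1 else cnt
    let seen' := seen.add t
    let c := suffix.getD t 0 - 1
    let suffix' := if c = 0 then suffix.erase t else suffix.insert t c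
    solutionAltGo rest' seen' suffix' cnt'

def solution_alt (topping : List Int) : Int :=
  let suffix := topping.foldl (fun d t => d.insert t (d.getD t 0 + 1)) PySem.Dict.empty
  solutionAltGo topping PySem.Set.empty suffix 0

-- ===== PRECONDITION & SPEC =====
def Spec_solution (topping : List Int) (out : Int) : Prop := out = solution_alt topping
instance (topping : List Int) (out : Int) : Decidable (Spec_solution topping out) := by unfold Spec_solution; infer_instance

-- ===== CLAIM (what is proved, stated in full; the proofs are below) =====
def Claim_equal_solution : Prop := ∀ (topping : List Int), Dom_solution topping → Spec_solution topping (solution topping)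

-- ===== LEMMAS AND PROOFS =====

theorem dict_getD_erase_self {κ ν : Type} [BEq κ] [LawfulBEq κ]
    (d : PySem.Dict κ ν) (k : κ) (d0 : ν) : (d.erase k).getD k d0 = d0 := by
  have h : List.find? (fun p => p.1 == k) (d.erase k).items = none := by
    rw [List.find?_eq_none]
    intro x hx
    simp only [PySem.Dict.erase, List.mem_filter] at hx
    simpa using hx.2
  simp [PySem.Dict.getD, PySem.Dict.get?, h]

theorem dict_getD_erase_of_ne {κ ν : Type} [BEq κ] [LawfulBEq κ]
    (d : PySem.Dict κ ν) (k k' : κ) (d0 : ν) (h : k' ≠ k) :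
    (d.erase k).getD k' d0 = d.getD k' d0 := by
  simp only [PySem.Dict.erase, PySem.Dict.getD, PySem.Dict.get?]
  induction d.items with
  | nil => rfl
  | cons p rest ih =>
    rw [List.filter_cons]
    by_cases hpk : p.1 = k
    · rw [if_neg (by simp [hpk])]
      rw [List.find?_cons_of_neg (by simp [hpk]; exact Ne.symm h)]
      exact ih
    · rw [if_pos (by simp [hpk])]
      by_cases hpk' : p.1 = k'
      · rw [List.find?_cons_of_pos (by simp [hpk']), List.find?_cons_of_pos (by simp [hpk'])]
      · rw [List.find?_cons_of_neg (by simp [hpk']), List.find?_cons_of_neg (by simp [hpk'])]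
        exact ih

theorem dict_keys_erase {κ ν : Type} [BEq κ]
    (d : PySem.Dict κ ν) (k : κ) :
    (d.erase k).keys = d.keys.filter (fun x => !(x == k)) := by
  simp [PySem.Dict.erase, PySem.Dict.keys, List.filter_map]
  rfl

theorem dict_size_eq_keys_length {κ ν : Type} [BEq κ] (d : PySem.Dict κ ν) :
    d.size = d.keys.length := by
  simp [PySem.Dict.size, PySem.Dict.keys]

theorem set_ofList_append_singleton {α : Type} [BEq α] (xs : List α) (t : α) :
    PySem.Set.ofList (xs ++ [t]) = (PySem.Set.ofList xs).add t := by
  simp [PySem.Set.ofList, List.foldl_append]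

-- number of distinct keys equals size of the set of a list with the same members
theorem keys_length_eq_ofList_length (keys : List Int) (l : List Int)
    (hnd : keys.Nodup) (hmem : ∀ k : Int, k ∈ keys ↔ k ∈ l) :
    keys.length = (PySem.Set.ofList l).length := by
  have hperm : keys.Perm (PySem.Set.ofList l) := by
    rw [List.perm_ext_iff_of_nodup hnd (PySem.Set.nodup_ofList l)]
    intro a
    rw [hmem a, PySem.Set.mem_ofList]
  exact hperm.length_eq

theorem solutionAltGo_spec :
    ∀ (rest pre : List Int) (seen : PySem.Set Int) (suffix : PySem.Dict Int Int) (cnt : Int),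
      seen = PySem.Set.ofList pre →
      (∀ k : Int, suffix.getD k 0 = (rest.count k : Int)) →
      suffix.keys.Nodup →
      (∀ k : Int, k ∈ suffix.keys ↔ k ∈ rest) →
      solutionAltGo rest seen suffix cnt =
        cnt + ((List.range rest.length).countP (fun j =>
          decide ((PySem.Set.ofList (pre ++ rest.take j)).length =
                  (PySem.Set.ofList (rest.drop j)).length)) : Int) := by
  intro rest
  induction rest with
  | nil => intro pre seen suffix cnt _ _ _ _; simp [solutionAltGo]
  | cons t rest' ih =>
    intro pre seen suffix cnt hseen hcnt hnd hmem
    have hsize : suffix.size = (PySem.Set.ofList (t :: rest')).length := by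
      rw [dict_size_eq_keys_length]
      exact keys_length_eq_ofList_length _ _ hnd hmem
    have hct : suffix.getD t 0 = ((t :: rest').count t : Int) := hcnt t
    have hcount_t : (t :: rest').count t = rest'.count t + 1 := by
      simp
    -- the updated suffix dictionary satisfies the invariants for rest'
    have hstep : ∀ (s' : PySem.Dict Int Int),
        s' = (if suffix.getD t 0 - 1 = 0 then suffix.erase t
              else suffix.insert t (suffix.getD t 0 - 1)) →
        (∀ k : Int, s'.getD k 0 = (rest'.count k : Int)) ∧
          s'.keys.Nodup ∧ (∀ k : Int, k ∈ s'.keys ↔ k ∈ rest') := by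
      intro s' hs'
      by_cases hc : suffix.getD t 0 - 1 = 0
      · have ht0 : rest'.count t = 0 := by
          rw [hct] at hc; push_cast [hcount_t] at hc; omega
        have htnotin : t ∉ rest' := by
          simpa using List.count_eq_zero.mp ht0
        rw [if_pos hc] at hs'
        refine ⟨?_, ?_, ?_⟩
        · intro k
          by_cases hk : k = t
          · subst hk; rw [hs', dict_getD_erase_self, ht0]; simp
          · have hk' : ¬ t = k := fun h => hk h.symm
            rw [hs', dict_getD_erase_of_ne _ _ _ _ hk, hcnt k]
            simp [hk']
        · rw [hs', dict_keys_erase]; exact hnd.filter _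
        · intro k
          rw [hs', dict_keys_erase, List.mem_filter]
          constructor
          · rintro ⟨hk, hne⟩
            have := (hmem k).mp hk
            simp at hne
            simpa [hne] using this
          · intro hk
            have hkne : k ≠ t := fun h => htnotin (h ▸ hk)
            exact ⟨(hmem k).mpr (by simp [hk]), by simp [hkne]⟩
      · have htpos : 0 < rest'.count t := by
          rw [hct] at hc; push_cast [hcount_t] at hc; omega
        have htin : t ∈ rest' := List.count_pos_iff.mp htpos
        have htkeys : t ∈ suffix.keys := (hmem t).mpr (by simp)
        have hcontains : suffix.contains t = true := by
          rw [PySem.Dict.contains_iff_mem_keys]; exact htkeys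
        rw [if_neg hc] at hs'
        have hkeys' : s'.keys = suffix.keys := by
          rw [hs']; exact PySem.Dict.keys_insert_of_contains suffix _ hcontains
        refine ⟨?_, ?_, ?_⟩
        · intro k
          rw [hs', PySem.Dict.getD_insert]
          by_cases hk : k = t
          · subst hk; rw [if_pos rfl, hct]; push_cast [hcount_t]; ring
          · have hk' : ¬ t = k := fun h => hk h.symm
            rw [if_neg hk, hcnt k]
            simp [hk']
        · rw [hkeys']; exact hnd
        · intro k
          rw [hkeys', hmem k]
          by_cases hk : k = t
          · subst hk; simp [htin]
          · simp [hk]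
    have hs := hstep _ rfl
    rw [solutionAltGo]
    rw [ih (pre ++ [t]) _ _ _ (by rw [hseen, set_ofList_append_singleton]) hs.1 hs.2.1 hs.2.2]
    -- recombine the count: split range (n+1) into index 0 and the shifted indices
    have hcountP : ((List.range (t :: rest').length).countP (fun j =>
          decide ((PySem.Set.ofList (pre ++ (t :: rest').take j)).length =
                  (PySem.Set.ofList ((t :: rest').drop j)).length)) : Nat)
        = ((List.range rest'.length).countP (fun j =>
            decide ((PySem.Set.ofList ((pre ++ [t]) ++ rest'.take j)).length =
                    (PySem.Set.ofList (rest'.drop j)).length)))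
          + (if (PySem.Set.ofList pre).length = (PySem.Set.ofList (t :: rest')).length
             then 1 else 0) := by
      rw [List.length_cons, List.range_succ_eq_map, List.countP_cons, List.countP_map]
      congr 1
      · apply List.countP_congr
        intro j _
        simp [Function.comp, List.take_succ_cons, List.drop_succ_cons]
      · simp
    rw [hcountP]
    have hcond : (seen.length = suffix.size) ↔
        ((PySem.Set.ofList pre).length = (PySem.Set.ofList (t :: rest')).length) := by
      rw [hseen, hsize]
    by_cases h0 : (PySem.Set.ofList pre).length = (PySem.Set.ofList (t :: rest')).length
    · rw [if_pos (hcond.mpr h0), if_pos h0]; push_cast; ring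
    · rw [if_neg (fun h => h0 (hcond.mp h)), if_neg h0]; push_cast; ring

theorem solution_alt_eq_countP (topping : List Int) :
    solution_alt topping =
      ((List.range topping.length).countP (fun j =>
        decide ((PySem.Set.ofList (topping.take j)).length =
                (PySem.Set.ofList (topping.drop j)).length)) : Int) := by
  show solutionAltGo topping PySem.Set.empty
      (topping.foldl (fun d t => d.insert t (d.getD t 0 + 1)) PySem.Dict.empty) 0 = _
  rw [PySem.Dict.foldl_insert_getD_add_one_eq_counter]
  rw [solutionAltGo_spec topping [] PySem.Set.empty (PySem.Dict.counter topping) 0 rfl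
    (fun k => PySem.Dict.getD_counter topping k)
    (PySem.Dict.nodup_keys_counter topping)
    (fun k => by rw [PySem.Dict.keys_counter]; exact PySem.Set.mem_ofList topping k)]
  simp only [List.nil_append, zero_add]
  rfl

theorem solution_eq_countP (topping : List Int) :
    solution topping =
      ((List.range topping.length).countP (fun j =>
        decide ((PySem.Set.ofList (topping.take j)).length =
                (PySem.Set.ofList (topping.drop j)).length)) : Int) := by
  unfold solution
  rw [PySem.List.pyRange_one, List.foldl_map]
  rw [PySem.List.foldl_ite_add_one
    (fun k : ℕ => (PySem.Set.ofList (PySem.List.slice topping none (some (0 + (k : Int))))).length =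
      (PySem.Set.ofList (PySem.List.slice topping (some (0 + (k : Int))) none)).length)]
  simp only [zero_add, PySem.List.slice_to_natCast, PySem.List.slice_from_natCast]
  simp

-- ===== VERDICT (by name: the statement is the Claim_ definition above) =====
theorem solution_spec : Claim_equal_solution := by
  intro topping _
  unfold Spec_solution
  rw [solution_eq_countP, solution_alt_eq_countP]
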